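-- pv_equiv track=rewrite | github.com/owenguobadia24s-collab/ovc-infra | scripts/repo_cartographer/cartographer.py | build_ownership_summary_md
-- ===== SOURCE A (Python) =====
-- from typing import Any
--
-- def build_ownership_summary_md(
--     records: list[dict[str, Any]],
--     modules: dict[str, Any],
--     head_commit: str,
--     run_id: str,
--     run_fingerprint: str,
-- ) -> str:
--     lines: list[str] = []
--     lines.append("# MODULE_OWNERSHIP_SUMMARY v0.1\n")
--     lines.append(f"| Field | Value |")
--     lines.append(f"|-------|-------|")
--     lines.append(f"| Run ID | `{run_id}` |")
--     lines.append(f"| Fingerprint | `{run_fingerprint}` |")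
--     lines.append(f"| HEAD | `{head_commit}` |")
--     lines.append(f"| Total Files | {len(records)} |")
--     lines.append("")
--
--     tracked_count = sum(1 for r in records if r["tracked_status"] == "tracked")
--     untracked_count = sum(1 for r in records if r["tracked_status"] == "untracked_visible")
--     lines.append("## By Tracked Status\n")
--     lines.append("| Status | Count |")
--     lines.append("|--------|-------|")
--     lines.append(f"| tracked | {tracked_count} |")
--     lines.append(f"| untracked_visible | {untracked_count} |")
--     lines.append("")
--
--     # Module counts
--     module_counts: dict[str, dict[str, int]] = {}
--     for r in records:
--         mid = r["module_id"]
--         if mid not in ("BORDERLAND", "UNKNOWN"):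
--             if mid not in module_counts:
--                 module_counts[mid] = {"tracked": 0, "untracked_visible": 0}
--             module_counts[mid][r["tracked_status"]] += 1
--
--     lines.append("## Module Ownership\n")
--     lines.append("| Module | Label | Tracked | Untracked | Total |")
--     lines.append("|--------|-------|---------|-----------|-------|")
--     for mid in sorted(module_counts.keys()):
--         label = modules.get(mid, {}).get("label", "")
--         t = module_counts[mid]["tracked"]
--         u = module_counts[mid]["untracked_visible"]
--         lines.append(f"| {mid} | {label} | {t} | {u} | {t + u} |")
--     lines.append("")
--
--     # Zone counts
--     zone_counts: dict[str, dict[str, int]] = {}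
--     for r in records:
--         zid = r["zone_id"]
--         if zid is not None:
--             if zid not in zone_counts:
--                 zone_counts[zid] = {"tracked": 0, "untracked_visible": 0}
--             zone_counts[zid][r["tracked_status"]] += 1
--
--     lines.append("## Borderland Zones\n")
--     lines.append("| Zone | Label | Tracked | Untracked | Total |")
--     lines.append("|------|-------|---------|-----------|-------|")
--     for zid in sorted(zone_counts.keys()):
--         label = modules.get(zid, {}).get("label", "")
--         t = zone_counts[zid]["tracked"]
--         u = zone_counts[zid]["untracked_visible"]
--         lines.append(f"| {zid} | {label} | {t} | {u} | {t + u} |")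
--     lines.append("")
--
--     # Unknown totals
--     unknown_tracked = sum(1 for r in records if r["module_id"] == "UNKNOWN" and r["tracked_status"] == "tracked")
--     unknown_untracked = sum(1 for r in records if r["module_id"] == "UNKNOWN" and r["tracked_status"] == "untracked_visible")
--     lines.append("## Unknown Files\n")
--     lines.append("| Status | Count |")
--     lines.append("|--------|-------|")
--     lines.append(f"| tracked | {unknown_tracked} |")
--     lines.append(f"| untracked_visible | {unknown_untracked} |")
--     lines.append(f"| **total** | **{unknown_tracked + unknown_untracked}** |")
--     lines.append("")
--
--     return "\n".join(lines) + "\n"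
-- ===== SOURCE B (Python) =====
-- def build_ownership_summary_md(
--     records,
--     modules,
--     head_commit,
--     run_id,
--     run_fingerprint,
-- ):
--     # Single aggregation pass (index-coded status, [tracked, untracked] pair counters),
--     # then the report is assembled as one string by direct concatenation.
--     totals = [0, 0]
--     unknown = [0, 0]
--     module_counts = {}
--     zone_counts = {}
--     for r in records:
--         st = r["tracked_status"]
--         idx = 0 if st == "tracked" else 1 if st == "untracked_visible" else None
--         if idx is not None:
--             totals[idx] += 1
--         mid = r["module_id"]
--         if mid == "UNKNOWN":
--             if idx is not None:
--                 unknown[idx] += 1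
--         elif mid != "BORDERLAND":
--             pair = module_counts.get(mid)
--             if pair is None:
--                 pair = module_counts[mid] = [0, 0]
--             pair[idx] += 1
--         zid = r["zone_id"]
--         if zid is not None:
--             pair = zone_counts.get(zid)
--             if pair is None:
--                 pair = zone_counts[zid] = [0, 0]
--             pair[idx] += 1
--
--     def section(counts):
--         # dict keys are unique, so sorting the items orders them by key
--         out = ""
--         for key, (t, u) in sorted(counts.items()):
--             label = modules.get(key, {}).get("label", "")
--             out += f"| {key} | {label} | {t} | {u} | {t + u} |\n"
--         return out
--
--     return (
--         "# MODULE_OWNERSHIP_SUMMARY v0.1\n"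
--         "\n"
--         "| Field | Value |\n"
--         "|-------|-------|\n"
--         f"| Run ID | `{run_id}` |\n"
--         f"| Fingerprint | `{run_fingerprint}` |\n"
--         f"| HEAD | `{head_commit}` |\n"
--         f"| Total Files | {len(records)} |\n"
--         "\n"
--         "## By Tracked Status\n"
--         "\n"
--         "| Status | Count |\n"
--         "|--------|-------|\n"
--         f"| tracked | {totals[0]} |\n"
--         f"| untracked_visible | {totals[1]} |\n"
--         "\n"
--         "## Module Ownership\n"
--         "\n"
--         "| Module | Label | Tracked | Untracked | Total |\n"
--         "|--------|-------|---------|-----------|-------|\n"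
--         + section(module_counts)
--         + "\n"
--         "## Borderland Zones\n"
--         "\n"
--         "| Zone | Label | Tracked | Untracked | Total |\n"
--         "|------|-------|---------|-----------|-------|\n"
--         + section(zone_counts)
--         + "\n"
--         "## Unknown Files\n"
--         "\n"
--         "| Status | Count |\n"
--         "|--------|-------|\n"
--         f"| tracked | {unknown[0]} |\n"
--         f"| untracked_visible | {unknown[1]} |\n"
--         f"| **total** | **{unknown[0] + unknown[1]}** |\n"
--         "\n"
--     )
-- ===== Notes on version B (the rewrite author's own statement) =====
-- stated objective: alternative
-- what changed: A scans records six times (four sum() comprehensions plus two dict-of-dicts building loops) and assembles a list of lines joined with newlines; B aggregates all six statistics in one pass using index-coded [tracked, untracked] pair counters, iterates sorted(counts.items()) instead of sorted keys with re-lookups, and builds the report by direct string concatenation.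
import Mathlib
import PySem

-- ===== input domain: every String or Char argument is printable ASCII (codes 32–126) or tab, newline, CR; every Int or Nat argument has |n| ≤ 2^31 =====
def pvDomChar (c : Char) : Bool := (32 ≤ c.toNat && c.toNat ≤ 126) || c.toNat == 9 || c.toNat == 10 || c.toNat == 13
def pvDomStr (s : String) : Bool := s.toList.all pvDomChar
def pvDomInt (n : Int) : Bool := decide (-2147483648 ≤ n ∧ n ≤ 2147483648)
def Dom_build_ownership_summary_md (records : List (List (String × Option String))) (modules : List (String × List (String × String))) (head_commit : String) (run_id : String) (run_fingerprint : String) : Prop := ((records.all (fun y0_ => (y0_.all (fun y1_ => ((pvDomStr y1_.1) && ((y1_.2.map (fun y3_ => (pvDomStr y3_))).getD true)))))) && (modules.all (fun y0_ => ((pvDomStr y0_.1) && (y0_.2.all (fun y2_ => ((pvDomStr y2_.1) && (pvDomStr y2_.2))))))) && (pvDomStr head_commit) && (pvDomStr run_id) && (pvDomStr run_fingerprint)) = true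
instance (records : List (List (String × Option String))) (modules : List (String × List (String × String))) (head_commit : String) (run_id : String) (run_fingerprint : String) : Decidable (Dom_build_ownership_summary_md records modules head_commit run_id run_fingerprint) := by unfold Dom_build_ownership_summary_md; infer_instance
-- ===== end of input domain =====

-- B replaces A's six separate scans over `records` and the line-list/join assembly by ONE
-- aggregation pass over index-coded (tracked, untracked) pair counters followed by direct
-- string concatenation (objective: alternative). Return-value equivalence only.

-- Shared transliterations of expressions BOTH Pythons contain verbatim:
-- r[k] (KeyError when missing — excluded by Pre_; `none` stands for the absent key there)
def pvGet (r : List (String × Option String)) (k : String) : Option String :=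
  ((PySem.Dict.mk r).get? k).getD none
-- modules.get(key, {}).get("label", "")
def pvLabel (modules : List (String × List (String × String))) (key : String) : String :=
  ((PySem.Dict.mk (((PySem.Dict.mk modules).get? key).getD [])).get? "label").getD ""

-- ===== PORT A =====
-- the literal {"tracked": 0, "untracked_visible": 0}
def pvFresh : PySem.Dict (Option String) Int :=
  PySem.Dict.mk [(some "tracked", 0), (some "untracked_visible", 0)]

-- predicates of A's four `sum(1 for r in records if …)` comprehensions
def pT (r : List (String × Option String)) : Bool := pvGet r "tracked_status" == some "tracked"
def pU (r : List (String × Option String)) : Bool := pvGet r "tracked_status" == some "untracked_visible"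
def pUT (r : List (String × Option String)) : Bool := pvGet r "module_id" == some "UNKNOWN" && pT r
def pUU (r : List (String × Option String)) : Bool := pvGet r "module_id" == some "UNKNOWN" && pU r

-- body of A's first aggregation loop (module_counts); a None module_id is unreachable under Pre_
def A_moduleStep (mc : PySem.Dict String (PySem.Dict (Option String) Int))
    (r : List (String × Option String)) : PySem.Dict String (PySem.Dict (Option String) Int) :=
  match pvGet r "module_id" with
  | some mid =>
      if mid = "BORDERLAND" ∨ mid = "UNKNOWN" then mc
      else
        let mc1 := if mc.contains mid then mc else mc.insert mid pvFresh
        mc1.modify mid PySem.Dict.empty (fun d => d.modify (pvGet r "tracked_status") 0 (· + 1))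
  | none => mc

-- body of A's second aggregation loop (zone_counts)
def A_zoneStep (zc : PySem.Dict String (PySem.Dict (Option String) Int))
    (r : List (String × Option String)) : PySem.Dict String (PySem.Dict (Option String) Int) :=
  match pvGet r "zone_id" with
  | some zid =>
      let zc1 := if zc.contains zid then zc else zc.insert zid pvFresh
      zc1.modify zid PySem.Dict.empty (fun d => d.modify (pvGet r "tracked_status") 0 (· + 1))
  | none => zc

def build_ownership_summary_md (records : List (List (String × Option String))) (modules : List (String × List (String × String))) (head_commit : String) (run_id : String) (run_fingerprint : String) : String :=
  let tracked_count : Int := (records.countP pT : Int)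
  let untracked_count : Int := (records.countP pU : Int)
  let module_counts := records.foldl A_moduleStep PySem.Dict.empty
  let zone_counts := records.foldl A_zoneStep PySem.Dict.empty
  let unknown_tracked : Int := (records.countP pUT : Int)
  let unknown_untracked : Int := (records.countP pUU : Int)
  let lines : List String :=
    ["# MODULE_OWNERSHIP_SUMMARY v0.1\n",
     "| Field | Value |",
     "|-------|-------|",
     "| Run ID | `" ++ run_id ++ "` |",
     "| Fingerprint | `" ++ run_fingerprint ++ "` |",
     "| HEAD | `" ++ head_commit ++ "` |",
     "| Total Files | " ++ PySem.Int.toStr (records.length : Int) ++ " |",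
     "",
     "## By Tracked Status\n",
     "| Status | Count |",
     "|--------|-------|",
     "| tracked | " ++ PySem.Int.toStr tracked_count ++ " |",
     "| untracked_visible | " ++ PySem.Int.toStr untracked_count ++ " |",
     "",
     "## Module Ownership\n",
     "| Module | Label | Tracked | Untracked | Total |",
     "|--------|-------|---------|-----------|-------|"]
    ++ (PySem.List.sorted module_counts.keys (fun x => x) false).map (fun mid =>
         let label := pvLabel modules mid
         let t := (module_counts.getD mid PySem.Dict.empty).getD (some "tracked") 0
         let u := (module_counts.getD mid PySem.Dict.empty).getD (some "untracked_visible") 0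
         "| " ++ mid ++ " | " ++ label ++ " | " ++ PySem.Int.toStr t ++ " | " ++ PySem.Int.toStr u ++ " | " ++ PySem.Int.toStr (t + u) ++ " |")
    ++ ["",
        "## Borderland Zones\n",
        "| Zone | Label | Tracked | Untracked | Total |",
        "|------|-------|---------|-----------|-------|"]
    ++ (PySem.List.sorted zone_counts.keys (fun x => x) false).map (fun zid =>
         let label := pvLabel modules zid
         let t := (zone_counts.getD zid PySem.Dict.empty).getD (some "tracked") 0
         let u := (zone_counts.getD zid PySem.Dict.empty).getD (some "untracked_visible") 0
         "| " ++ zid ++ " | " ++ label ++ " | " ++ PySem.Int.toStr t ++ " | " ++ PySem.Int.toStr u ++ " | " ++ PySem.Int.toStr (t + u) ++ " |")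
    ++ ["",
        "## Unknown Files\n",
        "| Status | Count |",
        "|--------|-------|",
        "| tracked | " ++ PySem.Int.toStr unknown_tracked ++ " |",
        "| untracked_visible | " ++ PySem.Int.toStr unknown_untracked ++ " |",
        "| **total** | **" ++ PySem.Int.toStr (unknown_tracked + unknown_untracked) ++ "** |",
        ""]
  PySem.Str.join "\n" lines ++ "\n"

-- ===== PORT B =====
-- idx = 0 if st == "tracked" else 1 if st == "untracked_visible" else None
def statusIdx (st : Option String) : Option Nat :=
  if st = some "tracked" then some 0 else if st = some "untracked_visible" then some 1 else none

-- pair[idx] += 1 on a two-element Python list, modelled as a pair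
def bumpPair (p : Int × Int) (i : Nat) : Int × Int :=
  if i = 0 then (p.1 + 1, p.2) else (p.1, p.2 + 1)

-- pair = counts.get(k); if pair is None: pair = counts[k] = [0, 0]; pair[idx] += 1
-- (the in-place mutation of the aliased list is the overwrite at key k)
def touch (c : PySem.Dict String (Int × Int)) (k : String) (idx : Option Nat) :
    PySem.Dict String (Int × Int) :=
  match idx with
  | none => c          -- Python raises TypeError here (pair[None]); unreachable under Pre_
  | some i =>
    match c.get? k with
    | some p => c.insert k (bumpPair p i)
    | none => c.insert k (bumpPair (0, 0) i)

-- the four accumulators of B's single pass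
structure Agg where
  tot : Int × Int
  unk : Int × Int
  mc : PySem.Dict String (Int × Int)
  zc : PySem.Dict String (Int × Int)

-- the body of B's `for r in records` loop
def bStep (s : Agg) (r : List (String × Option String)) : Agg :=
  let idx := statusIdx (pvGet r "tracked_status")
  let s1 := match idx with
            | some i => { s with tot := bumpPair s.tot i }
            | none => s
  let mid := pvGet r "module_id"
  let s2 := if mid = some "UNKNOWN" then
              match idx with
              | some i => { s1 with unk := bumpPair s1.unk i }
              | none => s1
            else if mid = some "BORDERLAND" then s1
            else match mid with
                 | some m => { s1 with mc := touch s1.mc m idx }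
                 | none => s1   -- a None module key; outside Pre_
  match pvGet r "zone_id" with
  | some z => { s2 with zc := touch s2.zc z idx }
  | none => s2

-- one row of B's `section`
def bRow (modules : List (String × List (String × String))) (kv : String × (Int × Int)) : String :=
  "| " ++ kv.1 ++ " | " ++ pvLabel modules kv.1 ++ " | " ++ PySem.Int.toStr kv.2.1 ++ " | " ++
    PySem.Int.toStr kv.2.2 ++ " | " ++ PySem.Int.toStr (kv.2.1 + kv.2.2) ++ " |\n"

-- section(counts): out += row over sorted(counts.items()); dict keys are unique, so
-- Python's tuple comparison on items orders by the key component alone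
def bSection (modules : List (String × List (String × String)))
    (counts : PySem.Dict String (Int × Int)) : String :=
  (PySem.List.sorted counts.items (fun kv => kv.1) false).foldl
    (fun out kv => out ++ bRow modules kv) ""

def build_ownership_summary_md_alt (records : List (List (String × Option String))) (modules : List (String × List (String × String))) (head_commit : String) (run_id : String) (run_fingerprint : String) : String :=
  let agg := records.foldl bStep ⟨(0, 0), (0, 0), PySem.Dict.empty, PySem.Dict.empty⟩
  "# MODULE_OWNERSHIP_SUMMARY v0.1\n\n| Field | Value |\n|-------|-------|\n| Run ID | `"
    ++ run_id ++ "` |\n| Fingerprint | `" ++ run_fingerprint ++ "` |\n| HEAD | `" ++ head_commit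
    ++ "` |\n| Total Files | " ++ PySem.Int.toStr (records.length : Int)
    ++ " |\n\n## By Tracked Status\n\n| Status | Count |\n|--------|-------|\n| tracked | "
    ++ PySem.Int.toStr agg.tot.1 ++ " |\n| untracked_visible | " ++ PySem.Int.toStr agg.tot.2
    ++ " |\n\n## Module Ownership\n\n| Module | Label | Tracked | Untracked | Total |\n|--------|-------|---------|-----------|-------|\n"
    ++ bSection modules agg.mc
    ++ "\n## Borderland Zones\n\n| Zone | Label | Tracked | Untracked | Total |\n|------|-------|---------|-----------|-------|\n"
    ++ bSection modules agg.zc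
    ++ "\n## Unknown Files\n\n| Status | Count |\n|--------|-------|\n| tracked | "
    ++ PySem.Int.toStr agg.unk.1 ++ " |\n| untracked_visible | " ++ PySem.Int.toStr agg.unk.2
    ++ " |\n| **total** | **" ++ PySem.Int.toStr (agg.unk.1 + agg.unk.2) ++ "** |\n\n"

-- ===== PRECONDITION & SPEC =====
def stGood (st : Option String) : Bool := st == some "tracked" || st == some "untracked_visible"

def recOK (r : List (String × Option String)) : Bool :=
  match (PySem.Dict.mk r).get? "module_id", (PySem.Dict.mk r).get? "tracked_status", (PySem.Dict.mk r).get? "zone_id" with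
  | some (some m), some st, some z =>
      ((m == "BORDERLAND" || m == "UNKNOWN") || stGood st) && (!z.isSome || stGood st)
  | _, _, _ => false

-- Pre_ excludes inputs where A raises: a record missing one of the three keys (KeyError), or a
-- status other than tracked/untracked_visible on a record that is counted into a module or zone
-- dict (KeyError on the inner increment).  It also excludes records whose module_id is None:
-- Python then keys module_counts by None, which raises TypeError in sorted() as soon as a string
-- module key coexists, and in the remaining degenerate case prints a 'None' row that the
-- Option-free String key type of the ports cannot represent.
def Pre_build_ownership_summary_md (records : List (List (String × Option String))) (modules : List (String × List (String × String))) (head_commit : String) (run_id : String) (run_fingerprint : String) : Prop :=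
  records.all recOK = true
instance (records : List (List (String × Option String))) (modules : List (String × List (String × String))) (head_commit : String) (run_id : String) (run_fingerprint : String) : Decidable (Pre_build_ownership_summary_md records modules head_commit run_id run_fingerprint) := by unfold Pre_build_ownership_summary_md; infer_instance

def pvWitness_build_ownership_summary_md : (List (List (String × Option String))) × (List (String × List (String × String))) × String × String × String :=
  ([[("tracked_status", some "tracked"), ("module_id", some "m1"), ("zone_id", some "z1")],
    [("tracked_status", some "untracked_visible"), ("module_id", some "UNKNOWN"), ("zone_id", none)]],
   [("m1", [("label", "Core")])], "abc123", "run-1", "fp-1")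

def Spec_build_ownership_summary_md (records : List (List (String × Option String))) (modules : List (String × List (String × String))) (head_commit : String) (run_id : String) (run_fingerprint : String) (out : String) : Prop := out = build_ownership_summary_md_alt records modules head_commit run_id run_fingerprint
instance (records : List (List (String × Option String))) (modules : List (String × List (String × String))) (head_commit : String) (run_id : String) (run_fingerprint : String) (out : String) : Decidable (Spec_build_ownership_summary_md records modules head_commit run_id run_fingerprint out) := by unfold Spec_build_ownership_summary_md; infer_instance

-- ===== CLAIM (what is proved, stated in full; the proofs are below) =====
def Claim_equal_build_ownership_summary_md : Prop := ∀ (records : List (List (String × Option String))) (modules : List (String × List (String × String))) (head_commit : String) (run_id : String) (run_fingerprint : String), Dom_build_ownership_summary_md records modules head_commit run_id run_fingerprint → Pre_build_ownership_summary_md records modules head_commit run_id run_fingerprint → Spec_build_ownership_summary_md records modules head_commit run_id run_fingerprint (build_ownership_summary_md records modules head_commit run_id run_fingerprint)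

-- ===== LEMMAS AND PROOFS =====

-- the (tracked, untracked) view of one of A's inner per-status dicts
def convPair (dd : PySem.Dict (Option String) Int) : Int × Int :=
  (dd.getD (some "tracked") 0, dd.getD (some "untracked_visible") 0)

-- B's pair dict simulates A's dict-of-dicts: same keys (same order), pairwise-converted values
def DRel (a : PySem.Dict String (PySem.Dict (Option String) Int))
    (b : PySem.Dict String (Int × Int)) : Prop :=
  b.keys = a.keys ∧ ∀ k, b.getD k (0, 0) = convPair (a.getD k PySem.Dict.empty)

theorem rel_empty : DRel PySem.Dict.empty PySem.Dict.empty := by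
  constructor
  · rfl
  · intro k; simp [convPair, PySem.Dict.getD_empty]

-- two strings are equal when their character lists are
theorem str_ext (s t : String) (h : s.toList = t.toList) : s = t := by
  have h1 : String.ofList s.toList = String.ofList t.toList := congrArg _ h
  rwa [String.ofList_toList, String.ofList_toList] at h1

theorem join_cons (sep a : String) (l : List String) (h : l ≠ []) :
    PySem.Str.join sep (a :: l) = a ++ sep ++ PySem.Str.join sep l := by
  cases l with
  | nil => simp at h
  | cons b t =>
    simp [PySem.Str.join, PySem.Chars.join_cons_cons, String.ofList_append,
      String.append_assoc, show ∀ x : List Char, String.ofList (sep.toList ++ x)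
        = sep ++ String.ofList x from fun x => by rw [String.ofList_append, String.ofList_toList]]
theorem join_one (sep a : String) : PySem.Str.join sep [a] = a := by
  simp [PySem.Str.join, PySem.Chars.join_singleton, String.ofList_toList]

theorem cat_shift (l : List String) (x : String) :
    l.foldl (· ++ ·) x = x ++ l.foldl (· ++ ·) "" := by
  induction l generalizing x with
  | nil => simp
  | cons a t ih => simp only [List.foldl_cons]; rw [ih, ih ("" ++ a)]; simp [String.append_assoc]
theorem join_split (rows rest : List String) (h : rest ≠ []) :
    PySem.Str.join "\n" (rows ++ rest)
      = (rows.map (· ++ "\n")).foldl (· ++ ·) "" ++ PySem.Str.join "\n" rest := by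
  induction rows with
  | nil => simp
  | cons r t ih =>
    rw [List.cons_append, join_cons _ _ _ (by simp [h]), ih, List.map_cons, List.foldl_cons,
      cat_shift (t.map (· ++ "\n")) ("" ++ (r ++ "\n"))]
    simp [String.append_assoc]

-- one counted record: A's check-insert-then-modify and B's get-insert agree
theorem touch_sim (a : PySem.Dict String (PySem.Dict (Option String) Int))
    (b : PySem.Dict String (Int × Int)) (k : String) (st : Option String)
    (hrel : DRel a b) (hst : stGood st = true) (hnd : b.keys.Nodup) :
    DRel ((if a.contains k then a else a.insert k pvFresh).modify k PySem.Dict.empty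
          (fun d => d.modify st 0 (· + 1)))
        (touch b k (statusIdx st)) ∧ (touch b k (statusIdx st)).keys.Nodup := by
  obtain ⟨hk, hv⟩ := hrel
  have hbc : b.contains k = a.contains k := by
    rw [PySem.Dict.contains_eq_decide_mem_keys, PySem.Dict.contains_eq_decide_mem_keys, hk]
  have hidx : ∃ i : Nat, statusIdx st = some i ∧
      (∀ d : PySem.Dict (Option String) Int,
        convPair (d.modify st 0 (· + 1)) = bumpPair (convPair d) i) := by
    simp only [stGood, Bool.or_eq_true, beq_iff_eq] at hst
    rcases hst with h | h
    · refine ⟨0, by simp [statusIdx, h], fun d => ?_⟩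
      simp [convPair, bumpPair, h, PySem.Dict.getD_modify]
    · refine ⟨1, by simp [statusIdx, h], fun d => ?_⟩
      simp [convPair, bumpPair, h, PySem.Dict.getD_modify]
  obtain ⟨i, hi, hconv⟩ := hidx
  by_cases hc : a.contains k = true
  · -- key already present on both sides
    obtain ⟨p, hp⟩ : ∃ p, b.get? k = some p := by
      have : (b.get? k).isSome := by rw [← PySem.Dict.contains_eq_isSome_get?, hbc, hc]
      exact Option.isSome_iff_exists.mp this
    have hpd : b.getD k (0, 0) = p := PySem.Dict.getD_of_get?_eq_some b (0, 0) hp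
    have hkeys : (b.insert k (bumpPair p i)).keys = b.keys :=
      PySem.Dict.keys_insert_of_contains b _ (by rw [hbc]; exact hc)
    have hkeysA : ∀ v, (a.insert k v).keys = a.keys :=
      fun v => PySem.Dict.keys_insert_of_contains a v hc
    rw [hi, hc, if_pos rfl]
    refine ⟨⟨?_, ?_⟩, ?_⟩
    · simp only [touch, hp, PySem.Dict.keys_modify, hkeys, hkeysA, hk]
    · intro k'
      simp only [touch, hp]
      rw [PySem.Dict.getD_insert, PySem.Dict.getD_modify]
      by_cases hkk : k' = k
      · rw [if_pos hkk, if_pos hkk, hconv, ← hv k, hpd]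
      · rw [if_neg hkk, if_neg hkk, hv k']
    · simp only [touch, hp, hkeys]; exact hnd
  · -- fresh key on both sides
    have hc' : a.contains k = false := by simpa using hc
    have hbc' : b.contains k = false := by rw [hbc]; exact hc'
    have hbn : b.get? k = none := by
      have h1 := PySem.Dict.contains_eq_isSome_get? b k
      rw [hbc'] at h1
      exact Option.not_isSome_iff_eq_none.mp (by rw [← h1]; simp)
    have hknotmem : k ∉ b.keys := by
      have h1 := PySem.Dict.contains_eq_decide_mem_keys (d := b) (k := k)
      rw [hbc'] at h1; simpa using h1.symm
    have hkeys : (b.insert k (bumpPair (0, 0) i)).keys = b.keys ++ [k] :=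
      PySem.Dict.keys_insert_of_not_contains b _ hbc'
    have hca : (a.insert k pvFresh).contains k = true := PySem.Dict.contains_insert_self a k pvFresh
    rw [hi, hc', if_neg (by simp)]
    refine ⟨⟨?_, ?_⟩, ?_⟩
    · simp only [touch, hbn]
      rw [PySem.Dict.keys_modify, hkeys,
        PySem.Dict.keys_insert_of_contains _ _ hca,
        PySem.Dict.keys_insert_of_not_contains a pvFresh hc', hk]
    · intro k'
      simp only [touch, hbn]
      rw [PySem.Dict.getD_insert, PySem.Dict.getD_modify]
      by_cases hkk : k' = k
      · have hgf : (a.insert k pvFresh).getD k PySem.Dict.empty = pvFresh :=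
          PySem.Dict.getD_of_get?_eq_some _ _ (PySem.Dict.get?_insert_self a k pvFresh)
        have hfresh : convPair pvFresh = (0, 0) := by decide
        rw [if_pos hkk, if_pos hkk, hconv, hgf, hfresh]
      · rw [if_neg hkk, if_neg hkk, hv k', PySem.Dict.getD_insert, if_neg hkk]
    · simp only [touch, hbn, hkeys]
      exact List.Nodup.append hnd (by simp) (by simpa using hknotmem)
-- one record of B's combined loop against A's six independent updates
theorem step_sim (s : Agg) (a z : PySem.Dict String (PySem.Dict (Option String) Int))
    (r : List (String × Option String)) (hok : recOK r = true)
    (ha : DRel a s.mc) (hz : DRel z s.zc) (hna : s.mc.keys.Nodup) (hnz : s.zc.keys.Nodup) :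
    (bStep s r).tot = (s.tot.1 + (if pT r then 1 else 0), s.tot.2 + (if pU r then 1 else 0)) ∧
    (bStep s r).unk = (s.unk.1 + (if pUT r then 1 else 0), s.unk.2 + (if pUU r then 1 else 0)) ∧
    DRel (A_moduleStep a r) (bStep s r).mc ∧ (bStep s r).mc.keys.Nodup ∧
    DRel (A_zoneStep z r) (bStep s r).zc ∧ (bStep s r).zc.keys.Nodup := by
  rcases hmid : (PySem.Dict.mk r).get? "module_id" with _ | om
  · simp [recOK, hmid] at hok
  rcases om with _ | m
  · simp [recOK, hmid] at hok
  rcases hst : (PySem.Dict.mk r).get? "tracked_status" with _ | st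
  · simp [recOK, hmid, hst] at hok
  rcases hzid : (PySem.Dict.mk r).get? "zone_id" with _ | z0
  · simp [recOK, hmid, hst, hzid] at hok
  simp only [recOK, hmid, hst, hzid, Bool.and_eq_true, Bool.or_eq_true, beq_iff_eq] at hok
  have pm : pvGet r "module_id" = some m := by simp [pvGet, hmid]
  have ps : pvGet r "tracked_status" = st := by simp [pvGet, hst]
  have pz : pvGet r "zone_id" = z0 := by simp [pvGet, hzid]
  by_cases hg : stGood st = true
  · -- counted record: status is tracked or untracked_visible
    have hcase : st = some "tracked" ∨ st = some "untracked_visible" := by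
      simpa [stGood] using hg
    obtain ⟨i, hidx, hbump⟩ : ∃ i, statusIdx st = some i ∧
        ∀ p : Int × Int, bumpPair p i
          = (p.1 + (if pT r then 1 else 0), p.2 + (if pU r then 1 else 0)) := by
      rcases hcase with h | h
      · exact ⟨0, by simp [statusIdx, h], fun p => by simp [bumpPair, pT, pU, ps, h]⟩
      · exact ⟨1, by simp [statusIdx, h], fun p => by simp [bumpPair, pT, pU, ps, h]⟩
    have hmodstep : A_moduleStep a r = (if m = "BORDERLAND" ∨ m = "UNKNOWN" then a else
        (if a.contains m then a else a.insert m pvFresh).modify m PySem.Dict.empty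
          (fun d => d.modify st 0 (· + 1))) := by
      simp only [A_moduleStep, pm, ps]
    have hzonestep : ∀ zid, z0 = some zid → A_zoneStep z r =
        (if z.contains zid then z else z.insert zid pvFresh).modify zid PySem.Dict.empty
          (fun d => d.modify st 0 (· + 1)) := by
      intro zid hzeq; simp only [A_zoneStep, pz, hzeq, ps]
    have hzonestep0 : z0 = none → A_zoneStep z r = z := by
      intro hzeq; simp only [A_zoneStep, pz, hzeq]
    have htouchM := touch_sim a s.mc m st ha hg hna
    have htouchZ : ∀ zid, DRel ((if z.contains zid then z else z.insert zid pvFresh).modify zid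
          PySem.Dict.empty (fun d => d.modify st 0 (· + 1))) (touch s.zc zid (statusIdx st)) ∧
        (touch s.zc zid (statusIdx st)).keys.Nodup :=
      fun zid => touch_sim z s.zc zid st hz hg hnz
    rw [hidx] at htouchM htouchZ
    by_cases hU : m = "UNKNOWN"
    · have hput : pUT r = pT r := by simp [pUT, pm, hU]
      have hpuu : pUU r = pU r := by simp [pUU, pm, hU]
      rcases hz0 : z0 with _ | zid
      · simp only [bStep, ps, pm, pz, hidx, hz0, hU, hmodstep]
        refine ⟨by simp [hbump], by simp [hbump, hput, hpuu], by simpa [hU] using ha,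
          by simpa using hna, by simpa [hzonestep0 hz0] using hz, by simpa using hnz⟩
      · simp only [bStep, ps, pm, pz, hidx, hz0, hU, hmodstep, hzonestep zid hz0]
        refine ⟨by simp [hbump], by simp [hbump, hput, hpuu], by simpa [hU] using ha,
          by simpa using hna, by simpa using (htouchZ zid).1, by simpa using (htouchZ zid).2⟩
    · by_cases hB : m = "BORDERLAND"
      · have hput : pUT r = false := by simp [pUT, pm, hB]
        have hpuu : pUU r = false := by simp [pUU, pm, hB]
        rcases hz0 : z0 with _ | zid
        · simp only [bStep, ps, pm, pz, hidx, hz0, hB, hmodstep]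
          refine ⟨by simp [hbump], by simp [hbump, hput, hpuu],
            by simpa [hB, hU] using ha, by simpa [hU] using hna,
            by simpa [hzonestep0 hz0, hU] using hz, by simpa [hU] using hnz⟩
        · simp only [bStep, ps, pm, pz, hidx, hz0, hB, hmodstep, hzonestep zid hz0]
          refine ⟨by simp [hbump], by simp [hbump, hput, hpuu],
            by simpa [hB, hU] using ha, by simpa [hU] using hna,
            by simpa [hU] using (htouchZ zid).1, by simpa [hU] using (htouchZ zid).2⟩
      · have hput : pUT r = false := by simp [pUT, pm, hU]
        have hpuu : pUU r = false := by simp [pUU, pm, hU]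
        rcases hz0 : z0 with _ | zid
        · simp only [bStep, ps, pm, pz, hidx, hz0, hmodstep]
          refine ⟨by simp [hbump, hU, hB], by simp [hbump, hput, hpuu, hU, hB],
            by simpa [hB, hU] using htouchM.1, by simpa [hU, hB] using htouchM.2,
            by simpa [hzonestep0 hz0, hU, hB] using hz, by simpa [hU, hB] using hnz⟩
        · simp only [bStep, ps, pm, pz, hidx, hz0, hmodstep, hzonestep zid hz0]
          refine ⟨by simp [hbump, hU, hB], by simp [hbump, hput, hpuu, hU, hB],
            by simpa [hB, hU] using htouchM.1, by simpa [hU, hB] using htouchM.2,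
            by simpa [hU, hB] using (htouchZ zid).1, by simpa [hU, hB] using (htouchZ zid).2⟩
  · -- not counted: status is neither tracked nor untracked_visible
    have hmBU : m = "BORDERLAND" ∨ m = "UNKNOWN" := by
      rcases hok.1 with h | h
      · exact h
      · exact absurd h hg
    have hz0 : z0 = none := by
      rcases hok.2 with h | h
      · simpa using h
      · exact absurd h hg
    have hgg : st ≠ some "tracked" ∧ st ≠ some "untracked_visible" := by
      constructor <;> (intro h; exact hg (by simp [stGood, h]))
    have hidx : statusIdx st = none := by simp [statusIdx, hgg.1, hgg.2]
    have h1 : pT r = false := by simp [pT, ps, hgg.1]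
    have h2 : pU r = false := by simp [pU, ps, hgg.2]
    have h3 : pUT r = false := by simp [pUT, pT, ps, hgg.1]
    have h4 : pUU r = false := by simp [pUU, pU, ps, hgg.2]
    have hA : A_moduleStep a r = a := by
      simp only [A_moduleStep, pm]; rw [if_pos hmBU]
    have hZ : A_zoneStep z r = z := by simp only [A_zoneStep, pz, hz0]
    rcases hmBU with hB | hU
    · simp only [bStep, ps, pm, pz, hidx, hz0, hB, hA, hZ, h1, h2, h3, h4]
      refine ⟨by simp, by simp, ?_, ?_, ?_, ?_⟩ <;>
        first
        | simpa [touch] using ha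
        | simpa [touch] using hna
        | simpa [touch] using hz
        | simpa [touch] using hnz
    · simp only [bStep, ps, pm, pz, hidx, hz0, hU, hA, hZ, h1, h2, h3, h4]
      refine ⟨by simp, by simp, ?_, ?_, ?_, ?_⟩ <;>
        first
        | simpa [touch] using ha
        | simpa [touch] using hna
        | simpa [touch] using hz
        | simpa [touch] using hnz

-- B's single fold simultaneously computes A's six aggregations
theorem fold_sim (l : List (List (String × Option String))) (s : Agg)
    (a z : PySem.Dict String (PySem.Dict (Option String) Int))
    (hok : ∀ r ∈ l, recOK r = true)
    (ha : DRel a s.mc) (hz : DRel z s.zc) (hna : s.mc.keys.Nodup) (hnz : s.zc.keys.Nodup) :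
    (l.foldl bStep s).tot = (s.tot.1 + (l.countP pT : Int), s.tot.2 + (l.countP pU : Int)) ∧
    (l.foldl bStep s).unk = (s.unk.1 + (l.countP pUT : Int), s.unk.2 + (l.countP pUU : Int)) ∧
    DRel (l.foldl A_moduleStep a) (l.foldl bStep s).mc ∧ (l.foldl bStep s).mc.keys.Nodup ∧
    DRel (l.foldl A_zoneStep z) (l.foldl bStep s).zc ∧ (l.foldl bStep s).zc.keys.Nodup := by
  induction l generalizing s a z with
  | nil => simpa using ⟨ha, hna, hz, hnz⟩
  | cons r t ih =>
    obtain ⟨e1, e2, e3, e4, e5, e6⟩ :=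
      step_sim s a z r (hok r (by simp)) ha hz hna hnz
    obtain ⟨f1, f2, f3, f4, f5, f6⟩ :=
      ih (bStep s r) (A_moduleStep a r) (A_zoneStep z r)
        (fun x hx => hok x (by simp [hx])) e3 e5 e4 e6
    simp only [List.foldl_cons]
    refine ⟨?_, ?_, f3, f4, f5, f6⟩
    · rw [f1, e1]; simp only [List.countP_cons, Prod.mk.injEq]
      constructor <;> (push_cast; split_ifs <;> omega)
    · rw [f2, e2]; simp only [List.countP_cons, Prod.mk.injEq]
      constructor <;> (push_cast; split_ifs <;> omega)

-- sorting a nodup-keyed dict's items orders them by key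
theorem sorted_items (b : PySem.Dict String (Int × Int)) (hnd : b.keys.Nodup) :
    PySem.List.sorted b.items (fun kv => kv.1) false
      = (PySem.List.sorted b.keys (fun x => x) false).map (fun k => (k, b.getD k (0, 0))) := by
  apply PySem.List.sorted_eq_of_perm_of_pairwise_lt
  · rw [PySem.Dict.items_eq_map_keys b hnd (0, 0)]
    exact (PySem.List.sorted_perm b.keys (fun x => x) false).map _
  · have hp := PySem.List.sorted_pairwise b.keys (fun x => x)
    have hn : (PySem.List.sorted b.keys (fun x => x) false).Nodup :=
      ((PySem.List.sorted_perm b.keys (fun x => x) false).nodup_iff).mpr hnd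
    rw [List.pairwise_map]
    exact (hp.and hn).imp (fun h => lt_of_le_of_ne h.1 h.2)

-- B's section over counts related to A's dict-of-dicts is A's row block, newline-terminated
theorem section_eq (modules : List (String × List (String × String)))
    (a : PySem.Dict String (PySem.Dict (Option String) Int)) (b : PySem.Dict String (Int × Int))
    (hrel : DRel a b) (hnd : b.keys.Nodup) :
    bSection modules b
      = (((PySem.List.sorted a.keys (fun x => x) false).map (fun k =>
          "| " ++ k ++ " | " ++ pvLabel modules k ++ " | "
            ++ PySem.Int.toStr ((a.getD k PySem.Dict.empty).getD (some "tracked") 0) ++ " | "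
            ++ PySem.Int.toStr ((a.getD k PySem.Dict.empty).getD (some "untracked_visible") 0) ++ " | "
            ++ PySem.Int.toStr ((a.getD k PySem.Dict.empty).getD (some "tracked") 0
                + (a.getD k PySem.Dict.empty).getD (some "untracked_visible") 0) ++ " |")).map
          (· ++ "\n")).foldl (· ++ ·) "" := by
  obtain ⟨hk, hv⟩ := hrel
  rw [bSection, sorted_items b hnd, hk, List.foldl_map, List.map_map, List.foldl_map]
  apply PySem.List.foldl_congr_mem
  intro acc k _
  have := hv k
  rw [Function.comp, bRow]
  simp only [this, convPair]
  apply str_ext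
  simp [String.toList_append]

-- ===== VERDICT (by name: the statement is the Claim_ definition above) =====
set_option maxRecDepth 8192 in
theorem build_ownership_summary_md_spec : Claim_equal_build_ownership_summary_md := by
  intro records modules head_commit run_id run_fingerprint _ hpre
  unfold Pre_build_ownership_summary_md at hpre
  have hok : ∀ r ∈ records, recOK r = true := by
    simpa [List.all_eq_true] using hpre
  obtain ⟨e1, e2, e3, e4, e5, e6⟩ :=
    fold_sim records ⟨(0, 0), (0, 0), PySem.Dict.empty, PySem.Dict.empty⟩
      PySem.Dict.empty PySem.Dict.empty hok rel_empty rel_empty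
      (by simp [PySem.Dict.keys_empty]) (by simp [PySem.Dict.keys_empty])
  unfold Spec_build_ownership_summary_md
  simp only [build_ownership_summary_md, build_ownership_summary_md_alt]
  rw [section_eq modules _ _ e3 e4, section_eq modules _ _ e5 e6, e1, e2]
  simp only [join_cons, join_split, join_one, List.append_assoc, List.cons_append,
    List.nil_append, ne_eq, List.append_eq_nil_iff, List.cons_ne_nil, and_false,
    not_false_eq_true]
  apply str_ext
  simp [String.toList_append]
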